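-- pv_equiv track=rewrite | github.com/Ishanbhatia98/codechef | dsa_learning_series/week7/etc/8_tle2_auhash.py | f
-- ===== SOURCE A (Python) =====
-- from collections import defaultdict
--
-- def f(n, s, last = 0):
--     if n==0 and s==0:
--         return 1
--     elif n==0 and s!=0:
--         return 0
--     elif n!=0 and s==0:
--         return 0
--     if d[(n, s, last)]!=-1:
--         return d[(n, s, last)]
--     t = 0
--     for i in range(1, 53):
--         if i<=s and i>last:
--             t+=f(n-1, s-i, last = i)
--     d[(n, s, last)] = t
--     return t
--
-- d = defaultdict(lambda :-1)
-- ===== SOURCE B (Python) =====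
-- def f(n, s, last=0):
--     if n == 0:
--         return 1 if s == 0 else 0
--     if n < 0 or s < 0 or n > 52 or s > 1378:
--         return 0
--     lo = last + 1 if last > 0 else 1
--     dp = [[1 if k == 0 and t == 0 else 0 for t in range(s + 1)]
--           for k in range(n + 1)]
--     for v in range(lo, 53):
--         dp = [[dp[k][t] + (dp[k - 1][t - v] if k > 0 and t >= v else 0)
--                for t in range(s + 1)] for k in range(n + 1)]
--     return dp[n][s]
-- ===== Notes on version B (the rewrite author's own statement) =====
-- stated objective: alternative
-- what changed: Replaces A's top-down memoized recursion over a global defaultdict (branching on each candidate next value) with a bottom-up 2D dynamic-programming table dp[k][sum] rebuilt per value v in lo..52 via include/exclude, guarded by the closed-form bounds n<=52 and s<=1378.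
import Mathlib
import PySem

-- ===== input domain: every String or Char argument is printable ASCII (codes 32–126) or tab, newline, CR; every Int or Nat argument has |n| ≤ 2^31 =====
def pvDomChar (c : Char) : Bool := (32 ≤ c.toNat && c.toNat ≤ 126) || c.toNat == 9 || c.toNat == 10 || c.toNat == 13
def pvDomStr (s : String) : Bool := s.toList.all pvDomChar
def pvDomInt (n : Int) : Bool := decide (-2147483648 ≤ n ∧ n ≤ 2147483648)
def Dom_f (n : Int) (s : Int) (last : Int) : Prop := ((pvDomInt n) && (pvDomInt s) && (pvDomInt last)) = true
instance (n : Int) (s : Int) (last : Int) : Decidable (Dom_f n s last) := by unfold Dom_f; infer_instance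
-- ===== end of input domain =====

-- B replaces A's top-down memoized recursion (global defaultdict) by a bottom-up 2D DP table
-- dp[k][sum] rebuilt per candidate value v (objective: alternative algorithm, similar cost).
-- A's global memo dict is threaded through the recursion; the defaultdict's insertion of -1 on a
-- missed read is not modelled, which never changes any lookup result (a -1 entry is always
-- overwritten before it can be read again, since 'last' strictly increases along any call chain).
-- The Nat fuel (53) only makes the recursion structurally total; it is never exhausted
-- (proved in fAux_correct below).

-- ===== PORT A =====
def fAux : Nat → Int → Int → Int → PySem.Dict (Int × Int × Int) Int →
    Int × PySem.Dict (Int × Int × Int) Int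
  | 0, _, _, _, d => (0, d)   -- unreachable: fuel guard only
  | fuel+1, n, s, last, d =>
    if n = 0 ∧ s = 0 then (1, d)
    else if n = 0 ∧ s ≠ 0 then (0, d)
    else if n ≠ 0 ∧ s = 0 then (0, d)
    else
      -- Python reads d[(n, s, last)] twice (test, then return); getD (-1) is the defaultdict read
      if d.getD (n, s, last) (-1) ≠ -1 then (d.getD (n, s, last) (-1), d)
      else
        let td := (PySem.List.pyRange 1 53 1).foldl
          (fun (acc : Int × PySem.Dict (Int × Int × Int) Int) i =>
            if i ≤ s ∧ i > last then
              let r := fAux fuel (n-1) (s-i) i acc.2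
              (acc.1 + r.1, r.2)
            else acc) (0, d)
        (td.1, td.2.insert (n, s, last) td.1)

def f (n : Int) (s : Int) (last : Int) : Int :=
  (fAux 53 n s last PySem.Dict.empty).1

-- ===== PORT B =====
-- dp[k][t] via Python list indexing; every index is in range, where pyGetD is exact
def pvGet2 (dp : List (List Int)) (k t : Int) : Int :=
  PySem.List.pyGetD (PySem.List.pyGetD dp k []) t 0

def f_alt (n : Int) (s : Int) (last : Int) : Int :=
  if n = 0 then (if s = 0 then 1 else 0)
  else if n < 0 ∨ s < 0 ∨ n > 52 ∨ s > 1378 then 0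
  else
    let lo : Int := if last > 0 then last + 1 else 1
    let dp0 : List (List Int) :=
      (PySem.List.pyRange 0 (n+1) 1).map (fun k =>
        (PySem.List.pyRange 0 (s+1) 1).map (fun t => if k = 0 ∧ t = 0 then 1 else 0))
    let dp := (PySem.List.pyRange lo 53 1).foldl
      (fun dp v =>
        (PySem.List.pyRange 0 (n+1) 1).map (fun k =>
          (PySem.List.pyRange 0 (s+1) 1).map (fun t =>
            pvGet2 dp k t + (if k > 0 ∧ t ≥ v then pvGet2 dp (k-1) (t-v) else 0)))) dp0
    pvGet2 dp n s

-- ===== PRECONDITION & SPEC =====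
def Spec_f (n : Int) (s : Int) (last : Int) (out : Int) : Prop := out = f_alt n s last
instance (n : Int) (s : Int) (last : Int) (out : Int) : Decidable (Spec_f n s last out) := by unfold Spec_f; infer_instance

-- ===== CLAIM (what is proved, stated in full; the proofs are below) =====
def Claim_equal_f : Prop := ∀ (n : Int) (s : Int) (last : Int), Dom_f n s last → Spec_f n s last (f n s last)

-- ===== LEMMAS AND PROOFS =====

-- Pure mathematical spec: A's recursion without the memo dict.
def g (n s last : Int) : Int :=
  if n = 0 ∧ s = 0 then 1
  else if n = 0 then 0
  else if s = 0 then 0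
  else ((PySem.List.pyRange 1 53 1).attach.map
    (fun x => if h : x.1 ≤ s ∧ x.1 > last then g (n-1) (s - x.1) x.1 else 0)).sum
termination_by (53 - last).toNat
decreasing_by
  have hx := PySem.List.mem_pyRange_one.mp x.2
  omega

lemma g_eq (n s last : Int) (hn : ¬ n = 0) (hs : ¬ s = 0) :
    g n s last = ((PySem.List.pyRange 1 53 1).map
      (fun i => if i ≤ s ∧ i > last then g (n-1) (s - i) i else 0)).sum := by
  rw [g]
  simp only [hn, hs, if_false, and_false]
  have e : (PySem.List.pyRange 1 53 1).attach.map
      (fun x => if h : x.1 ≤ s ∧ x.1 > last then g (n-1) (s - x.1) x.1 else 0)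
      = (PySem.List.pyRange 1 53 1).attach.map
      (fun x => if x.1 ≤ s ∧ x.1 > last then g (n-1) (s - x.1) x.1 else 0) := by
    apply List.map_congr_left
    intro x hx
    by_cases h : x.1 ≤ s ∧ x.1 > last
    · simp only [dif_pos h]; simp [h]
    · simp only [dif_neg h]; simp [h]
  rw [e]
  exact congrArg List.sum (List.attach_map_val
    (f := fun i => if i ≤ s ∧ i > last then g (n-1) (s - i) i else 0))

lemma last_ind (P : Int → Prop) (h : ∀ last, (∀ i, last < i → i < 53 → P i) → P last) :
    ∀ last, P last := by
  have key : ∀ m : Nat, ∀ l : Int, (53 - l).toNat ≤ m → P l := by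
    intro m
    induction m with
    | zero => intro l hl; exact h l (fun i hi1 hi2 => by omega)
    | succ m ih => intro l hl; exact h l (fun i hi1 hi2 => ih i (by omega))
  intro last; exact key (53 - last).toNat last le_rfl

lemma g_sum_zero (n s last : Int) (hn : ¬ n = 0) (hs : ¬ s = 0)
    (h : ∀ i : Int, 1 ≤ i → i < 53 → i ≤ s → i > last → g (n-1) (s - i) i = 0) :
    g n s last = 0 := by
  rw [g_eq n s last hn hs]
  apply List.sum_eq_zero
  intro y hy
  rcases List.mem_map.mp hy with ⟨i, hi, rfl⟩
  have hb := PySem.List.mem_pyRange_one.mp hi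
  by_cases hc : i ≤ s ∧ i > last
  · rw [if_pos hc]; exact h i (by omega) (by omega) hc.1 hc.2
  · rw [if_neg hc]

lemma g_zero_n (n s last : Int) (hn : n = 0) : g n s last = if s = 0 then 1 else 0 := by
  rw [g]; by_cases hs : s = 0 <;> simp [hn, hs]

lemma g_zero_s (n s last : Int) (hn : ¬ n = 0) (hs : s = 0) : g n s last = 0 := by
  rw [g]; simp [hn, hs]

lemma g_neg_s (n s last : Int) (hs : s < 0) : g n s last = 0 := by
  have hn : n = 0 ∨ ¬ n = 0 := by tauto
  rcases hn with hn | hn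
  · rw [g_zero_n n s last hn, if_neg (by omega)]
  · exact g_sum_zero n s last hn (by omega) (fun i h1 h2 h3 h4 => by omega)

lemma g_neg_n (n s last : Int) (hn : n < 0) : g n s last = 0 := by
  induction last using last_ind generalizing n s with
  | h last ih =>
    by_cases hs : s = 0
    · exact g_zero_s n s last (by omega) hs
    · exact g_sum_zero n s last (by omega) hs
        (fun i h1 h2 h3 h4 => ih i h4 h2 (n-1) (s-i) (by omega))

lemma g_gt (n s last : Int) (h1 : 1 ≤ n) (h2 : 52 - max last 0 < n) : g n s last = 0 := by
  induction last using last_ind generalizing n s with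
  | h last ih =>
    by_cases hs : s = 0
    · exact g_zero_s n s last (by omega) hs
    · apply g_sum_zero n s last (by omega) hs
      intro i hi1 hi2 hi3 hi4
      exact ih i hi4 hi2 (n-1) (s-i) (by omega) (by omega)

def TT (last : Int) : Int := (PySem.List.pyRange (max last 0 + 1) 53 1).sum

lemma sum_pyRange_nonneg (a : Int) (ha : 1 ≤ a) : 0 ≤ (PySem.List.pyRange a 53 1).sum := by
  apply List.sum_nonneg
  intro x hx
  have := PySem.List.mem_pyRange_one.mp hx
  omega

lemma TT_nonneg (last : Int) : 0 ≤ TT last := sum_pyRange_nonneg _ (by omega)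

lemma sum_pyRange_full : (PySem.List.pyRange 1 53 1).sum = 1378 := by decide

lemma TT_le (last : Int) : TT last ≤ 1378 := by
  unfold TT
  set m := max last 0 with hm
  have hm0 : 0 ≤ m := le_max_right _ _
  by_cases h : m + 1 ≤ 53
  · have hsplit := PySem.List.pyRange_one_append 1 (m+1) 53 (by omega) (by omega)
    have : (PySem.List.pyRange 1 53 1).sum
        = (PySem.List.pyRange 1 (m+1) 1).sum + (PySem.List.pyRange (m+1) 53 1).sum := by
      rw [hsplit, List.sum_append]
    have h1 : 0 ≤ (PySem.List.pyRange 1 (m+1) 1).sum := by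
      apply List.sum_nonneg; intro x hx; have := PySem.List.mem_pyRange_one.mp hx; omega
    have h2 := sum_pyRange_full
    omega
  · rw [PySem.List.pyRange_one_eq_nil (by omega)]
    simp

lemma TT_drop (last i : Int) (h1 : max last 0 < i) (h2 : i ≤ 52) : i + TT i ≤ TT last := by
  have hm0 : (0:Int) ≤ max last 0 := le_max_right _ _
  have hsplit := PySem.List.pyRange_one_append (max last 0 + 1) i 53 (by omega) (by omega)
  have hcons := PySem.List.pyRange_one_cons (a := i) (b := 53) (by omega)
  have hTi : TT i = (PySem.List.pyRange (i+1) 53 1).sum := by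
    unfold TT; congr 2; omega
  have h1' : 0 ≤ (PySem.List.pyRange (max last 0 + 1) i 1).sum := by
    apply List.sum_nonneg; intro x hx; have := PySem.List.mem_pyRange_one.mp hx; omega
  have key : TT last = (PySem.List.pyRange (max last 0 + 1) i 1).sum
      + (i + (PySem.List.pyRange (i+1) 53 1).sum) := by
    unfold TT
    rw [hsplit, List.sum_append, hcons, List.sum_cons]
  omega

lemma g_big_aux (last : Int) : ∀ n s : Int, TT last < s → g n s last = 0 := by
  induction last using last_ind with
  | h last ih =>
    intro n s hs
    have h0 := TT_nonneg last
    by_cases hn : n = 0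
    · rw [g_zero_n n s last hn, if_neg (by omega)]
    · apply g_sum_zero n s last hn (by omega)
      intro i h1 h2 h3 h4
      apply ih i h4 h2
      have := TT_drop last i (by omega) (by omega)
      omega

lemma g_big (n s last : Int) (hs : 1378 < s) : g n s last = 0 :=
  g_big_aux last n s (by have := TT_le last; omega)

lemma g_norm (n s last : Int) : g n s last = g n s (max last 0) := by
  by_cases hn : n = 0
  · rw [g_zero_n n s last hn, g_zero_n n s (max last 0) hn]
  · by_cases hs : s = 0
    · rw [g_zero_s n s last hn hs, g_zero_s n s (max last 0) hn hs]
    · rw [g_eq n s last hn hs, g_eq n s (max last 0) hn hs]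
      congr 1
      apply List.map_congr_left
      intro i hi
      have hb := PySem.List.mem_pyRange_one.mp hi
      by_cases hc : i ≤ s ∧ i > last
      · rw [if_pos hc, if_pos (by omega : i ≤ s ∧ i > max last 0)]
      · rw [if_neg hc, if_neg (by omega : ¬ (i ≤ s ∧ i > max last 0))]

def cnt (lo k t v : Int) : Int :=
  if h : v < lo then (if k = 0 ∧ t = 0 then 1 else 0)
  else cnt lo k t (v-1) + (if 0 < k ∧ v ≤ t then cnt lo (k-1) (t-v) (v-1) else 0)
termination_by (v + 1 - lo).toNat
decreasing_by all_goals omega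

lemma cnt_ind (lo : Int) (P : Int → Prop) (base : ∀ v, v < lo → P v)
    (step : ∀ v, ¬ v < lo → P (v-1) → P v) : ∀ v, P v := by
  have key : ∀ m : Nat, ∀ w : Int, (w + 1 - lo).toNat ≤ m → P w := by
    intro m
    induction m with
    | zero => intro w hw; exact base w (by omega)
    | succ m ih =>
      intro w hw
      by_cases hw2 : w < lo
      · exact base w hw2
      · exact step w hw2 (ih (w-1) (by omega))
  intro v; exact key (v+1-lo).toNat v le_rfl

lemma cnt_zero (lo t v : Int) : cnt lo 0 t v = if t = 0 then 1 else 0 := by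
  induction v using cnt_ind (lo := lo) with
  | base v hv => rw [cnt]; simp [hv]
  | step v hv ih => rw [cnt]; simp [hv, ih]

lemma cnt_neg (lo k t v : Int) (hk : k < 0) : cnt lo k t v = 0 := by
  induction v using cnt_ind (lo := lo) generalizing k t with
  | base v hv => rw [cnt]; simp [hv]; omega
  | step v hv ih => rw [cnt]; simp [hv, ih _ _ hk]; intro h; omega

lemma cnt_nonpos (lo k t v : Int) (hlo : 1 ≤ lo) (hk : ¬ k = 0) (ht : t ≤ 0) :
    cnt lo k t v = 0 := by
  induction v using cnt_ind (lo := lo) with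
  | base v hv => rw [cnt]; simp [hv]; omega
  | step v hv ih => rw [cnt]; simp [hv, ih]; intro h1 h2; omega

lemma cnt_base (lo k t v : Int) (h : v < lo) :
    cnt lo k t v = if k = 0 ∧ t = 0 then 1 else 0 := by rw [cnt]; simp [h]

lemma cnt_step (lo k t v : Int) (h : ¬ v < lo) :
    cnt lo k t v = cnt lo k t (v-1) + (if 0 < k ∧ v ≤ t then cnt lo (k-1) (t-v) (v-1) else 0) := by
  rw [cnt]; simp [h]

lemma cnt_min (lo : Int) (hlo : 1 ≤ lo) :
    ∀ (m : Nat) (k t : Int), cnt lo k t (lo + m) =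
      cnt (lo+1) k t (lo + m) +
        (if 0 < k ∧ lo ≤ t then cnt (lo+1) (k-1) (t-lo) (lo + m) else 0) := by
  intro m
  induction m with
  | zero =>
    intro k t
    simp only [Nat.cast_zero, add_zero]
    rw [cnt_step lo k t lo (by omega), cnt_base lo k t (lo-1) (by omega),
        cnt_base (lo+1) k t lo (by omega)]
    by_cases h : 0 < k ∧ lo ≤ t
    · rw [if_pos h, if_pos h, cnt_base lo (k-1) (t-lo) (lo-1) (by omega),
          cnt_base (lo+1) (k-1) (t-lo) lo (by omega)]
    · rw [if_neg h, if_neg h]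
  | succ m ih =>
    intro k t
    have hv : (lo + (m+1 : Nat) : Int) = (lo + m) + 1 := by push_cast; ring
    rw [hv]
    set v : Int := lo + m + 1 with hvdef
    have hw : v - 1 = lo + m := by omega
    rw [cnt_step lo k t v (by omega), cnt_step (lo+1) k t v (by omega), hw]
    rw [ih k t]
    by_cases c2 : 0 < k ∧ v ≤ t
    · rw [if_pos c2, if_pos c2, ih (k-1) (t-v)]
      by_cases c1 : 0 < k ∧ lo ≤ t
      · rw [if_pos c1, if_pos c1, cnt_step (lo+1) (k-1) (t-lo) v (by omega), hw]
        by_cases c3 : 0 < k - 1 ∧ lo ≤ t - v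
        · have c3' : 0 < k - 1 ∧ v ≤ t - lo := by omega
          rw [if_pos c3, if_pos c3']
          have e : t - v - lo = t - lo - v := by ring
          rw [e]; ring
        · have c3' : ¬ (0 < k - 1 ∧ v ≤ t - lo) := by omega
          rw [if_neg c3, if_neg c3']; ring
      · have hc : ¬ (0 < k - 1 ∧ lo ≤ t - v) := by omega
        rw [if_neg c1, if_neg c1, if_neg hc]; ring
    · rw [if_neg c2, if_neg c2]
      by_cases c1 : 0 < k ∧ lo ≤ t
      · rw [if_pos c1, if_pos c1, cnt_step (lo+1) (k-1) (t-lo) v (by omega), hw]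
        have hc : ¬ (0 < k - 1 ∧ v ≤ t - lo) := by omega
        rw [if_neg hc]; ring
      · rw [if_neg c1, if_neg c1]

lemma g_split (n s last : Int) (hn : ¬ n = 0) (hs : ¬ s = 0) (h0 : 0 ≤ last) (h1 : last ≤ 51) :
    g n s last = (if last + 1 ≤ s then g (n-1) (s - (last+1)) (last+1) else 0) + g n s (last+1) := by
  rw [g_eq n s last hn hs, g_eq n s (last+1) hn hs]
  rw [PySem.List.pyRange_one_append 1 (last+1) 53 (by omega) (by omega),
      PySem.List.pyRange_one_cons (a := last+1) (b := 53) (by omega)]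
  simp only [List.map_append, List.sum_append, List.map_cons, List.sum_cons]
  have z1 : (List.map (fun i => if i ≤ s ∧ i > last then g (n-1) (s - i) i else 0)
      (PySem.List.pyRange 1 (last+1) 1)).sum = 0 := by
    apply List.sum_eq_zero; intro y hy
    rcases List.mem_map.mp hy with ⟨i, hi, rfl⟩
    have hb := PySem.List.mem_pyRange_one.mp hi
    rw [if_neg (by omega)]
  have z2 : (List.map (fun i => if i ≤ s ∧ i > last + 1 then g (n-1) (s - i) i else 0)
      (PySem.List.pyRange 1 (last+1) 1)).sum = 0 := by
    apply List.sum_eq_zero; intro y hy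
    rcases List.mem_map.mp hy with ⟨i, hi, rfl⟩
    have hb := PySem.List.mem_pyRange_one.mp hi
    rw [if_neg (by omega)]
  have z3 : (List.map (fun i => if i ≤ s ∧ i > last then g (n-1) (s - i) i else 0)
      (PySem.List.pyRange (last+1+1) 53 1))
      = (List.map (fun i => if i ≤ s ∧ i > last + 1 then g (n-1) (s - i) i else 0)
      (PySem.List.pyRange (last+1+1) 53 1)) := by
    apply List.map_congr_left; intro i hi
    have hb := PySem.List.mem_pyRange_one.mp hi
    by_cases hc : i ≤ s
    · rw [if_pos (by omega), if_pos (by omega)]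
    · rw [if_neg (by omega), if_neg (by omega)]
  rw [z1, z2, z3, if_neg (by omega : ¬ (last + 1 ≤ s ∧ last + 1 > last + 1))]
  by_cases hd : last + 1 ≤ s
  · rw [if_pos (by omega : (last+1) ≤ s ∧ (last+1) > last), if_pos hd]; ring
  · rw [if_neg (by omega : ¬ ((last+1) ≤ s ∧ (last+1) > last)), if_neg hd]; ring

lemma g_eq_cnt (last : Int) : 0 ≤ last → ∀ n s : Int, g n s last = cnt (last+1) n s 52 := by
  induction last using last_ind with
  | h last ih =>
    intro h0 n s
    by_cases hbig : 52 ≤ last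
    · have hcnt : cnt (last+1) n s 52 = if n = 0 ∧ s = 0 then 1 else 0 :=
        cnt_base _ _ _ _ (by omega)
      by_cases hn : n = 0
      · rw [g_zero_n n s last hn, hcnt]
        by_cases hs : s = 0 <;> simp [hn, hs]
      · rw [hcnt, if_neg (by tauto)]
        by_cases hs : s = 0
        · exact g_zero_s n s last hn hs
        · exact g_sum_zero n s last hn hs (fun i h1 h2 h3 h4 => by omega)
    · -- 0 ≤ last ≤ 51
      by_cases hn : n = 0
      · rw [g_zero_n n s last hn, hn, cnt_zero]
      · rcases lt_trichotomy n 0 with hneg | hz | hpos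
        · rw [g_neg_n n s last hneg, cnt_neg _ _ _ _ hneg]
        · omega
        · by_cases hs0 : s = 0
          · rw [g_zero_s n s last hn hs0, cnt_nonpos _ _ _ _ (by omega) hn (by omega)]
          · by_cases hsneg : s < 0
            · rw [g_neg_s n s last hsneg, cnt_nonpos _ _ _ _ (by omega) hn (by omega)]
            · -- s > 0, 1 ≤ n
              have hm := cnt_min (last+1) (by omega) (51 - last).toNat n s
              have he : (last + 1 + ((51 - last).toNat : Int)) = 52 := by omega
              rw [he] at hm
              rw [hm]
              have ih1 := ih (last+1) (by omega) (by omega) (by omega) n s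
              have ih2 := ih (last+1) (by omega) (by omega) (by omega) (n-1) (s-(last+1))
              rw [g_split n s last hn hs0 h0 (by omega), ih1, ih2]
              have : (0 < n ∧ last + 1 ≤ s) ↔ (last + 1 ≤ s) := by omega
              by_cases hd : last + 1 ≤ s
              · rw [if_pos hd, if_pos (by omega : 0 < n ∧ last + 1 ≤ s)]
                have e2 : last + 1 + 1 = last + 2 := by ring
                rw [e2]; ring
              · rw [if_neg hd, if_neg (by omega : ¬ (0 < n ∧ last + 1 ≤ s))]
                have e2 : last + 1 + 1 = last + 2 := by ring
                rw [e2]; ring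

def pvTable (n s : Int) (F : Int → Int → Int) : List (List Int) :=
  (PySem.List.pyRange 0 (n+1) 1).map (fun k =>
    (PySem.List.pyRange 0 (s+1) 1).map (fun t => F k t))

def pvStep (n s : Int) (dp : List (List Int)) (v : Int) : List (List Int) :=
  (PySem.List.pyRange 0 (n+1) 1).map (fun k =>
    (PySem.List.pyRange 0 (s+1) 1).map (fun t =>
      pvGet2 dp k t + (if k > 0 ∧ t ≥ v then pvGet2 dp (k-1) (t-v) else 0)))

lemma falt_body (n s last : Int) (hn : ¬ n = 0) (hg : ¬ (n < 0 ∨ s < 0 ∨ n > 52 ∨ s > 1378)) :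
    f_alt n s last = pvGet2 ((PySem.List.pyRange (if last > 0 then last + 1 else 1) 53 1).foldl
      (pvStep n s) (pvTable n s (fun k t => if k = 0 ∧ t = 0 then 1 else 0))) n s := by
  unfold f_alt
  rw [if_neg hn, if_neg hg]
  rfl

lemma get2_table (n s : Int) (F : Int → Int → Int) (k t : Int)
    (hk : 0 ≤ k) (hk2 : k < n+1) (ht : 0 ≤ t) (ht2 : t < s+1) :
    pvGet2 (pvTable n s F) k t = F k t := by
  unfold pvGet2 pvTable
  rw [PySem.List.pyGetD_map_pyRange_of_nonneg _ _ _ _ hk hk2,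
      PySem.List.pyGetD_map_pyRange_of_nonneg _ _ _ _ ht ht2]

lemma step_table (n s v : Int) (F : Int → Int → Int) (hv : 1 ≤ v) :
    pvStep n s (pvTable n s F) v
    = pvTable n s (fun k t => F k t + if 0 < k ∧ v ≤ t then F (k-1) (t-v) else 0) := by
  unfold pvStep pvTable
  apply List.map_congr_left
  intro k hk
  have hkb := PySem.List.mem_pyRange_one.mp hk
  apply List.map_congr_left
  intro t ht
  have htb := PySem.List.mem_pyRange_one.mp ht
  beta_reduce
  rw [show pvGet2 ((PySem.List.pyRange 0 (n+1) 1).map (fun k =>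
      (PySem.List.pyRange 0 (s+1) 1).map (fun t => F k t))) k t
      = pvGet2 (pvTable n s F) k t from rfl]
  rw [show pvGet2 ((PySem.List.pyRange 0 (n+1) 1).map (fun k =>
      (PySem.List.pyRange 0 (s+1) 1).map (fun t => F k t))) (k-1) (t-v)
      = pvGet2 (pvTable n s F) (k-1) (t-v) from rfl]
  rw [get2_table n s F k t (by omega) (by omega) (by omega) (by omega)]
  by_cases hc : 0 < k ∧ v ≤ t
  · rw [if_pos hc, if_pos hc,
        get2_table n s F (k-1) (t-v) (by omega) (by omega) (by omega) (by omega)]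
  · rw [if_neg hc, if_neg hc]

lemma table_congr (n s : Int) (F G : Int → Int → Int) (h : ∀ k t, F k t = G k t) :
    pvTable n s F = pvTable n s G := by
  unfold pvTable
  apply List.map_congr_left; intro k _
  apply List.map_congr_left; intro t _
  exact h k t

lemma dp_fold (n s lo : Int) (hlo : 1 ≤ lo) :
    ∀ m : Nat, lo - 1 + m ≤ 52 →
      (PySem.List.pyRange lo (lo + m) 1).foldl (pvStep n s)
        (pvTable n s (fun k t => if k = 0 ∧ t = 0 then 1 else 0))
      = pvTable n s (fun k t => cnt lo k t (lo - 1 + m)) := by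
  intro m
  induction m with
  | zero =>
    intro _
    rw [show lo + ((0:Nat):Int) = lo by push_cast; ring,
        PySem.List.pyRange_one_eq_nil le_rfl]
    rw [List.foldl_nil]
    apply table_congr
    intro k t
    rw [cnt_base lo k t (lo - 1 + ((0:Nat):Int)) (by push_cast; omega)]
  | succ m ih =>
    intro hle
    have hle' : lo - 1 + m ≤ 52 := by push_cast at hle ⊢; omega
    have hsplit : PySem.List.pyRange lo (lo + ((m+1:Nat):Int)) 1
        = PySem.List.pyRange lo (lo + m) 1 ++ [lo + m] := by
      have h2 := PySem.List.pyRange_one_succ_right (a := lo) (b := lo + m) (by omega)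
      rw [show lo + ((m+1:Nat):Int) = lo + (m:Int) + 1 by push_cast; ring, h2]
    rw [hsplit, List.foldl_append, ih hle']
    rw [List.foldl_cons, List.foldl_nil]
    rw [step_table n s (lo + m) _ (by omega)]
    apply table_congr
    intro k t
    rw [cnt_step lo k t (lo - 1 + ((m+1:Nat):Int)) (by push_cast; omega)]
    have e1 : lo - 1 + ((m+1:Nat):Int) = lo + (m:Int) := by push_cast; ring
    rw [e1]
    have e3 : lo + (m:Int) - 1 = lo - 1 + (m:Int) := by ring
    rw [e3]

lemma falt_eq_cnt (n s last : Int) (h1 : 1 ≤ n) (h2 : n ≤ 52) (h3 : 0 ≤ s) (h4 : s ≤ 1378) :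
    f_alt n s last = cnt (if last > 0 then last + 1 else 1) n s 52 := by
  rw [falt_body n s last (by omega) (by omega)]
  set lo : Int := if last > 0 then last + 1 else 1 with hlo
  have hlo1 : 1 ≤ lo := by rw [hlo]; split <;> omega
  by_cases hbig : 53 < lo
  · rw [PySem.List.pyRange_one_eq_nil (by omega : (53:Int) ≤ lo), List.foldl_nil]
    rw [get2_table n s _ n s (by omega) (by omega) (by omega) (by omega)]
    rw [cnt_base lo n s 52 (by omega)]
  · have hm53 : lo + (((53 - lo).toNat : Nat) : Int) = 53 := by omega
    have hd := dp_fold n s lo hlo1 (53 - lo).toNat (by omega)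
    rw [hm53] at hd
    rw [hd]
    rw [get2_table n s _ n s (by omega) (by omega) (by omega) (by omega)]
    congr 1
    omega

def pvValid (d : PySem.Dict (Int × Int × Int) Int) : Prop :=
  ∀ p w, d.get? p = some w → w = g p.1 p.2.1 p.2.2

lemma floop (fuel : Nat) (n s last : Int)
    (ihrec : ∀ (n' s' last' : Int) d', (53 - min (max last' 0) 52).toNat ≤ fuel → pvValid d' →
      (fAux fuel n' s' last' d').1 = g n' s' last' ∧ pvValid (fAux fuel n' s' last' d').2)
    (hb : (53 - min (max last 0) 52).toNat ≤ fuel + 1) :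
    ∀ (L : List Int), (∀ i ∈ L, 1 ≤ i ∧ i < 53) →
    ∀ acc : Int × PySem.Dict (Int × Int × Int) Int, pvValid acc.2 →
    (L.foldl (fun acc i => if i ≤ s ∧ i > last then
        let r := fAux fuel (n-1) (s-i) i acc.2
        (acc.1 + r.1, r.2) else acc) acc).1
      = acc.1 + (L.map (fun i => if i ≤ s ∧ i > last then g (n-1) (s-i) i else 0)).sum
    ∧ pvValid (L.foldl (fun acc i => if i ≤ s ∧ i > last then
        let r := fAux fuel (n-1) (s-i) i acc.2
        (acc.1 + r.1, r.2) else acc) acc).2 := by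
  intro L
  induction L with
  | nil => intro _ acc hacc; simp [hacc]
  | cons i L ihL =>
    intro hmem acc hacc
    have hi := hmem i (by simp)
    rw [List.foldl_cons, List.map_cons, List.sum_cons]
    by_cases hc : i ≤ s ∧ i > last
    · rw [if_pos hc]
      have hbound : (53 - min (max i 0) 52).toNat ≤ fuel := by omega
      obtain ⟨hr1, hr2⟩ := ihrec (n-1) (s-i) i acc.2 hbound hacc
      have := ihL (fun j hj => hmem j (by simp [hj]))
        (acc.1 + (fAux fuel (n-1) (s-i) i acc.2).1, (fAux fuel (n-1) (s-i) i acc.2).2) hr2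
      refine ⟨?_, this.2⟩
      rw [this.1]
      simp only [hr1]
      rw [if_pos hc]
      ring
    · rw [if_neg hc, if_neg hc]
      have := ihL (fun j hj => hmem j (by simp [hj])) acc hacc
      refine ⟨?_, this.2⟩
      rw [this.1]
      ring

lemma fAux_correct : ∀ (fuel : Nat) (n s last : Int) (d : PySem.Dict (Int × Int × Int) Int),
    (53 - min (max last 0) 52).toNat ≤ fuel → pvValid d →
    (fAux fuel n s last d).1 = g n s last ∧ pvValid (fAux fuel n s last d).2 := by
  intro fuel
  induction fuel with
  | zero => intro n s last d hb hd; exfalso; omega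
  | succ fuel ih =>
    intro n s last d hb hd
    by_cases h1 : n = 0 ∧ s = 0
    · rw [show fAux (fuel+1) n s last d = (1, d) by rw [fAux]; rw [if_pos h1]]
      exact ⟨by rw [g_zero_n n s last h1.1, if_pos h1.2], hd⟩
    · by_cases h2 : n = 0
      · have hs : ¬ s = 0 := by tauto
        rw [show fAux (fuel+1) n s last d = (0, d) by
          rw [fAux, if_neg h1, if_pos (⟨h2, hs⟩ : n = 0 ∧ s ≠ 0)]]
        exact ⟨by rw [g_zero_n n s last h2, if_neg hs], hd⟩
      · by_cases h3 : s = 0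
        · rw [show fAux (fuel+1) n s last d = (0, d) by
            rw [fAux, if_neg h1, if_neg (by tauto : ¬ (n = 0 ∧ s ≠ 0)),
                if_pos (⟨h2, h3⟩ : n ≠ 0 ∧ s = 0)]]
          exact ⟨(g_zero_s n s last h2 h3).symm, hd⟩
        · by_cases hv : d.getD (n, s, last) (-1) ≠ -1
          · rw [show fAux (fuel+1) n s last d = (d.getD (n, s, last) (-1), d) by
              rw [fAux, if_neg h1, if_neg (by tauto : ¬ (n = 0 ∧ s ≠ 0)),
                  if_neg (by tauto : ¬ (n ≠ 0 ∧ s = 0)), if_pos hv]]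
            refine ⟨?_, hd⟩
            rcases hg : d.get? (n, s, last) with _ | w
            · exfalso
              apply hv
              rw [PySem.Dict.getD_eq_get?_getD, hg]
              rfl
            · have := hd (n, s, last) w hg
              rw [PySem.Dict.getD_eq_get?_getD, hg]
              exact this
          · have hkey : fAux (fuel+1) n s last d =
                (let td := (PySem.List.pyRange 1 53 1).foldl
                  (fun (acc : Int × PySem.Dict (Int × Int × Int) Int) i =>
                    if i ≤ s ∧ i > last then
                      let r := fAux fuel (n-1) (s-i) i acc.2
                      (acc.1 + r.1, r.2)
                    else acc) (0, d)
                 (td.1, td.2.insert (n, s, last) td.1)) := by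
              rw [fAux, if_neg h1, if_neg (by tauto : ¬ (n = 0 ∧ s ≠ 0)),
                  if_neg (by tauto : ¬ (n ≠ 0 ∧ s = 0)), if_neg hv]
            rw [hkey]
            have hloop := floop fuel n s last ih hb (PySem.List.pyRange 1 53 1)
              (fun i hi => by
                have := PySem.List.mem_pyRange_one.mp hi
                omega) (0, d) hd
            simp only at hloop
            obtain ⟨hl1, hl2⟩ := hloop
            have ht : ((PySem.List.pyRange 1 53 1).foldl
                (fun (acc : Int × PySem.Dict (Int × Int × Int) Int) i =>
                  if i ≤ s ∧ i > last then
                    let r := fAux fuel (n-1) (s-i) i acc.2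
                    (acc.1 + r.1, r.2)
                  else acc) (0, d)).1 = g n s last := by
              rw [hl1, g_eq n s last h2 h3]
              ring
            refine ⟨ht, ?_⟩
            intro p w hw
            rw [PySem.Dict.get?_insert] at hw
            by_cases hp : p = (n, s, last)
            · rw [if_pos hp] at hw
              cases hw
              rw [hp]
              exact ht
            · rw [if_neg hp] at hw
              exact hl2 p w hw

lemma f_eq_g (n s last : Int) : f n s last = g n s last := by
  unfold f
  refine (fAux_correct 53 n s last PySem.Dict.empty (by omega) ?_).1
  intro p w hw
  rw [PySem.Dict.get?_empty] at hw
  cases hw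

lemma f_eq (n s last : Int) : f n s last = f_alt n s last := by
  by_cases hn0 : n = 0
  · rw [f_eq_g, g_zero_n n s last hn0]
    unfold f_alt
    rw [if_pos hn0]
  · by_cases hg : n < 0 ∨ s < 0 ∨ n > 52 ∨ s > 1378
    · have hrhs : f_alt n s last = 0 := by
        unfold f_alt; rw [if_neg hn0, if_pos hg]
      rw [hrhs, f_eq_g]
      rcases hg with h | h | h | h
      · exact g_neg_n n s last h
      · exact g_neg_s n s last h
      · exact g_gt n s last (by omega) (by have : (0:Int) ≤ max last 0 := le_max_right _ _; omega)
      · exact g_big n s last h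
    · rw [falt_eq_cnt n s last (by omega) (by omega) (by omega) (by omega)]
      rw [f_eq_g, g_norm]
      rw [g_eq_cnt (max last 0) (le_max_right _ _) n s]
      congr 1
      have h0 : (0:Int) ≤ max last 0 := le_max_right _ _
      split <;> omega

-- ===== VERDICT (by name: the statement is the Claim_ definition above) =====
theorem f_spec : Claim_equal_f := by
  unfold Claim_equal_f Spec_f
  intro n s last _
  exact f_eq n s last
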